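-- pv_equiv track=rewrite | github.com/jagdishwar/CP | Encrypting Messages.py | setlimit
-- ===== SOURCE A (Python) =====
-- import math
--
-- def setlimit(strlen):
--     l=math.floor(math.sqrt(strlen))
--     r=math.ceil(math.sqrt(strlen))
--     minvalue=0
--     row=0
--     col=0
--     i=l
--     j=l
--     while i<=r and j<=r:
--         if i*j>=strlen:
--             minvalue=i*j
--             row=i
--             col=j
--             break
--         if j==r:
--             i+=1
--             j=i
--
--         if j!=r:
--             j+=1
--     return (row,col)
--
-- strlen=0
-- ===== SOURCE B (Python) =====
-- import math
--
-- def setlimit(strlen):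
--     l = math.floor(math.sqrt(strlen))
--     if l * l >= strlen:
--         return (l, l)
--     if l * (l + 1) >= strlen:
--         return (l, l + 1)
--     return (l + 1, l + 1)
-- ===== Notes on version B (the rewrite author's own statement) =====
-- stated objective: simpler
-- what changed: Replaced A's stateful while-loop over candidate (row,col) cells by a direct three-branch closed form on l = floor(sqrt(strlen)): (l,l), (l,l+1) or (l+1,l+1).
import Mathlib
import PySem

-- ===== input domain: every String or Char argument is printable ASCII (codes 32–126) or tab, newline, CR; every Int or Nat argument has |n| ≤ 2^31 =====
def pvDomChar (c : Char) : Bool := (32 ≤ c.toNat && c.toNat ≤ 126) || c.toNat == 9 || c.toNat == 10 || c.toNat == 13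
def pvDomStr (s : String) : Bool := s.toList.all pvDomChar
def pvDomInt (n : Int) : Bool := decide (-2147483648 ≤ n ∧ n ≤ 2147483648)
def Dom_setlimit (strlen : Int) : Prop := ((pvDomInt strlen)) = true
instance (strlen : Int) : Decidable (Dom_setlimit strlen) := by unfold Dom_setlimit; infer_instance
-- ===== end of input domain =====

-- B replaces A's stateful while-loop by a direct three-branch closed form on l = floor(sqrt(strlen)) (objective: simpler).

-- ===== PORT A =====
-- A's while-loop, transliterated with the same state (minvalue,row,col,i,j).
-- Fuel: since r ≤ l+1 the loop body runs at most 3 times before the break fires; 8 is ample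
-- and never the binding bound on any input.
def setlimitGo (strlen r : Int) : Nat → Int → Int → Int → Int → Int → Int × Int
  | 0, _, row, col, _, _ => (row, col)
  | Nat.succ fuel, minvalue, row, col, i, j =>
    if i ≤ r ∧ j ≤ r then
      if i * j ≥ strlen then
        -- minvalue=i*j; row=i; col=j; break
        (i, j)
      else
        let p := if j = r then (i + 1, i + 1) else (i, j)
        let j2 := if p.2 ≠ r then p.2 + 1 else p.2
        setlimitGo strlen r fuel minvalue row col p.1 j2
    else (row, col)

-- math.floor(math.sqrt n) = Nat.sqrt and math.ceil(math.sqrt n) = l or l+1: exact for 0 ≤ n ≤ 2^31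
-- (double sqrt is correctly rounded and n < 2^52).
def setlimit (strlen : Int) : Int × Int :=
  let l : Int := (Nat.sqrt strlen.toNat : Int)
  let r : Int := if l * l = strlen then l else l + 1
  setlimitGo strlen r 8 0 0 0 l l

-- ===== PORT B =====
def setlimit_alt (strlen : Int) : Int × Int :=
  let l : Int := (Nat.sqrt strlen.toNat : Int)
  if l * l ≥ strlen then (l, l)
  else if l * (l + 1) ≥ strlen then (l, l + 1)
  else (l + 1, l + 1)

-- ===== PRECONDITION & SPEC =====
-- Pre_ excludes strlen < 0, on which math.sqrt raises ValueError in both A and B.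
def Pre_setlimit (strlen : Int) : Prop := 0 ≤ strlen
instance (strlen : Int) : Decidable (Pre_setlimit strlen) := by unfold Pre_setlimit; infer_instance
def pvWitness_setlimit : Int := 10

def Spec_setlimit (strlen : Int) (out : Int × Int) : Prop := out = setlimit_alt strlen
instance (strlen : Int) (out : Int × Int) : Decidable (Spec_setlimit strlen out) := by unfold Spec_setlimit; infer_instance

-- ===== CLAIM (what is proved, stated in full; the proofs are below) =====
def Claim_equal_setlimit : Prop := ∀ (strlen : Int), Dom_setlimit strlen → Pre_setlimit strlen → Spec_setlimit strlen (setlimit strlen)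

-- ===== LEMMAS AND PROOFS =====

-- one unfolding step of A's loop
lemma setlimitGo_succ (s r mv row col i j : Int) (f : Nat) :
    setlimitGo s r (f + 1) mv row col i j =
      if i ≤ r ∧ j ≤ r then
        if i * j ≥ s then (i, j)
        else
          let p := if j = r then (i + 1, i + 1) else (i, j)
          let j2 := if p.2 ≠ r then p.2 + 1 else p.2
          setlimitGo s r f mv row col p.1 j2
      else (row, col) := rfl

-- A's loop, started at (l,l) with r = ceil-sqrt, equals B's three-branch closed form.
lemma setlimitGo_closed (n l : Int) (hls : l * l ≤ n) (hlt : n < (l + 1) * (l + 1)) :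
    setlimitGo n (if l * l = n then l else l + 1) 8 0 0 0 l l
      = if l * l ≥ n then (l, l)
        else if l * (l + 1) ≥ n then (l, l + 1) else (l + 1, l + 1) := by
  by_cases hsq : l * l = n
  · have hge : l * l ≥ n := ge_of_eq hsq
    rw [if_pos hsq, if_pos hge, show (8 : Nat) = 7 + 1 from rfl, setlimitGo_succ]
    rw [if_pos ⟨le_refl l, le_refl l⟩, if_pos hge]
  · have hr : ¬ (l * l ≥ n) := fun h => hsq (le_antisymm hls h)
    have hjne : l ≠ l + 1 := by omega
    have e1 : setlimitGo n (l + 1) 8 0 0 0 l l = setlimitGo n (l + 1) 7 0 0 0 l (l + 1) := by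
      rw [show (8 : Nat) = 7 + 1 from rfl, setlimitGo_succ,
        if_pos ⟨by omega, by omega⟩, if_neg hr]
      simp [hjne]
    rw [if_neg hsq, if_neg hr, e1]
    by_cases h2 : l * (l + 1) ≥ n
    · rw [if_pos h2, show (7 : Nat) = 6 + 1 from rfl, setlimitGo_succ,
        if_pos ⟨by omega, by omega⟩, if_pos h2]
    · have e2 : setlimitGo n (l + 1) 7 0 0 0 l (l + 1)
          = setlimitGo n (l + 1) 6 0 0 0 (l + 1) (l + 1) := by
        rw [show (7 : Nat) = 6 + 1 from rfl, setlimitGo_succ,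
          if_pos ⟨by omega, by omega⟩, if_neg h2]
        simp
      rw [if_neg h2, e2, show (6 : Nat) = 5 + 1 from rfl, setlimitGo_succ,
        if_pos ⟨le_refl _, le_refl _⟩, if_pos (le_of_lt hlt)]

-- ===== VERDICT (by name: the statement is the Claim_ definition above) =====
theorem setlimit_spec : Claim_equal_setlimit := by
  intro n _ hp
  unfold Spec_setlimit
  simp only [setlimit, setlimit_alt]
  have hls : ((Nat.sqrt n.toNat : Int)) * ((Nat.sqrt n.toNat : Int)) ≤ n := by
    have h2 : ((Nat.sqrt n.toNat * Nat.sqrt n.toNat : Nat) : Int) ≤ ((n.toNat : Nat) : Int) :=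
      Int.ofNat_le.mpr (by simpa [pow_two] using Nat.sqrt_le' n.toNat)
    rw [Int.natCast_mul, Int.toNat_of_nonneg hp] at h2
    exact h2
  have hlt : n < ((Nat.sqrt n.toNat : Int) + 1) * ((Nat.sqrt n.toNat : Int) + 1) := by
    have h2 : ((n.toNat : Nat) : Int) < (((Nat.sqrt n.toNat + 1) * (Nat.sqrt n.toNat + 1) : Nat) : Int) :=
      Int.ofNat_lt.mpr (by simpa [pow_two, Nat.succ_eq_add_one] using Nat.lt_succ_sqrt' n.toNat)
    rw [Int.natCast_mul, Int.toNat_of_nonneg hp] at h2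
    push_cast at h2
    exact h2
  exact setlimitGo_closed n _ hls hlt
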